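-- pv_equiv track=rewrite | github.com/MauiST/Autocal | tools/report.py | _overall_class
-- ===== SOURCE A (Python) =====
-- def _overall_class(rows):
--     """
--     Determine the worst EN60751 class from a sensor's bath rows.
--     Class priority: FAIL > C > B > A > AA
--     Returns a string or None if no data.
--     """
--     priority = {'AA': 0, 'A': 1, 'B': 2, 'C': 3, 'FAIL': 4}
--     worst = None
--     for row in rows:
--         cls = row.get('class')
--         if cls and cls in priority:
--             if worst is None or priority[cls] > priority[worst]:
--                 worst = cls
--     return worst
-- ===== SOURCE B (Python) =====
-- def _overall_class(rows):
--     """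
--     Determine the worst EN60751 class from a sensor's bath rows.
--     Class priority: FAIL > C > B > A > AA
--     Returns a string or None if no data.
--     """
--     present = {row.get('class') for row in rows}
--     for cls in ('FAIL', 'C', 'B', 'A', 'AA'):
--         if cls in present:
--             return cls
--     return None
-- ===== Notes on version B (the rewrite author's own statement) =====
-- stated objective: simpler
-- what changed: Instead of a running-max over rows with numeric priority comparisons, B collects the row classes into a set in one pass and then scans the fixed priority order FAIL>C>B>A>AA, returning the first class present.
import Mathlib
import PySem

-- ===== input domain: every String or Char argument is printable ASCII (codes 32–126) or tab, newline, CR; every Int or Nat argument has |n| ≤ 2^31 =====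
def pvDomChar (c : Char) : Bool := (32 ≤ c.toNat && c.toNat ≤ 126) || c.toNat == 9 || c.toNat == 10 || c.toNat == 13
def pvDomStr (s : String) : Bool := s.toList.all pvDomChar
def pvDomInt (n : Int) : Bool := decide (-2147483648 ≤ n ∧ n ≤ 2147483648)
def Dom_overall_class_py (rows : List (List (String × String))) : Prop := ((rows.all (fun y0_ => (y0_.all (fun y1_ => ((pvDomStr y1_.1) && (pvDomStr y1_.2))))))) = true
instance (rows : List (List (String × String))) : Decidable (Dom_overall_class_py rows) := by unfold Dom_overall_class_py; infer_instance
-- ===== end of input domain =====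

-- B replaces A's running-max over rows (numeric priority comparison) with a one-pass set of
-- present classes followed by a scan of the fixed priority order; simpler, same cost.


-- ===== PORT A =====
-- priority = {'AA': 0, 'A': 1, 'B': 2, 'C': 3, 'FAIL': 4}
def pvPriority : PySem.Dict String Int :=
  PySem.Dict.ofList [("AA", 0), ("A", 1), ("B", 2), ("C", 3), ("FAIL", 4)]

-- the loop body; `priority[cls]`/`priority[worst]` are ported with getD (-1): both lookups are
-- guarded (cls by the membership test, worst by the loop invariant), so the default is never used
def pvStepA (worst : Option String) (row : List (String × String)) : Option String :=
  match PySem.Dict.get? (PySem.Dict.mk row) "class" with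
  | none => worst
  | some c =>
    if c ≠ "" && pvPriority.contains c then
      match worst with
      | none => some c
      | some wc => if pvPriority.getD c (-1) > pvPriority.getD wc (-1) then some c else worst
    else worst

def overall_class_py (rows : List (List (String × String))) : Option String :=
  rows.foldl pvStepA none

-- ===== PORT B =====
def overall_class_py_alt (rows : List (List (String × String))) : Option String :=
  let present : PySem.Set (Option String) :=
    PySem.Set.ofList (rows.map (fun row => PySem.Dict.get? (PySem.Dict.mk row) "class"))
  List.find? (fun c => present.contains (some c)) ["FAIL", "C", "B", "A", "AA"]

-- ===== PRECONDITION & SPEC =====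
def Spec_overall_class_py (rows : List (List (String × String))) (out : Option String) : Prop := out = overall_class_py_alt rows
instance (rows : List (List (String × String))) (out : Option String) : Decidable (Spec_overall_class_py rows out) := by unfold Spec_overall_class_py; infer_instance

-- ===== CLAIM (what is proved, stated in full; the proofs are below) =====
def Claim_equal_overall_class_py : Prop := ∀ (rows : List (List (String × String))), Dom_overall_class_py rows → Spec_overall_class_py rows (overall_class_py rows)

-- ===== LEMMAS AND PROOFS =====

-- priority value of a class string
def pvPr (c : String) : Int := pvPriority.getD c (-1)

-- A's comparison as a binary operation (tie keeps the left operand)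
def pvCombine (w v : Option String) : Option String :=
  match v with
  | none => w
  | some c =>
    match w with
    | none => some c
    | some wc => if pvPr c > pvPr wc then some c else some wc

-- the valid-class filter of A's guard
def pvCls (x : Option String) : Option String :=
  match x with
  | none => none
  | some c => if c ≠ "" && pvPriority.contains c then some c else none

-- B's scan expressed over the plain list of looked-up classes
def pvBest (gs : List (Option String)) : Option String :=
  List.find? (fun c => gs.contains (some c)) ["FAIL", "C", "B", "A", "AA"]

lemma pvCombine_none_left (v : Option String) : pvCombine none v = v := by
  cases v <;> rfl

lemma pvStepA_eq (w : Option String) (row : List (String × String)) :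
    pvStepA w row = pvCombine w (pvCls (PySem.Dict.get? (PySem.Dict.mk row) "class")) := by
  simp only [pvStepA]
  rcases PySem.Dict.get? (PySem.Dict.mk row) "class" with _ | c
  · rfl
  · simp only [pvCls]
    split_ifs with hg
    · cases w <;> rfl
    · rfl

lemma pvCombine_assoc (a b c : Option String) :
    pvCombine (pvCombine a b) c = pvCombine a (pvCombine b c) := by
  rcases a with _ | a
  · rw [pvCombine_none_left, pvCombine_none_left]
  rcases b with _ | b
  · rw [show pvCombine (some a) none = some a from rfl, pvCombine_none_left]
  rcases c with _ | c
  · rfl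
  by_cases h1 : pvPr b > pvPr a <;> by_cases h2 : pvPr c > pvPr b <;>
    by_cases h3 : pvPr c > pvPr a <;>
      simp [pvCombine, h1, h2, h3] <;> first | rfl | (exfalso; omega)

lemma pvBest_eq_ifs (gs : List (Option String)) :
    pvBest gs =
      if some "FAIL" ∈ gs then some "FAIL" else
      if some "C" ∈ gs then some "C" else
      if some "B" ∈ gs then some "B" else
      if some "A" ∈ gs then some "A" else
      if some "AA" ∈ gs then some "AA" else none := by
  by_cases m1 : some "FAIL" ∈ gs <;> by_cases m2 : some "C" ∈ gs <;>
    by_cases m3 : some "B" ∈ gs <;> by_cases m4 : some "A" ∈ gs <;>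
      by_cases m5 : some "AA" ∈ gs <;>
        simp [pvBest, List.find?, m1, m2, m3, m4, m5]

lemma pvPriority_mk :
    pvPriority = PySem.Dict.mk [("AA", 0), ("A", 1), ("B", 2), ("C", 3), ("FAIL", 4)] := by
  decide

lemma pvBest_cons (g : Option String) (gs : List (Option String)) :
    pvBest (g :: gs) = pvCombine (pvCls g) (pvBest gs) := by
  rw [pvBest_eq_ifs, pvBest_eq_ifs gs]
  rcases g with _ | c
  · rw [show pvCls none = none from rfl, pvCombine_none_left]
    simp [List.mem_cons]
  by_cases hF : c = "FAIL"
  · subst hF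
    by_cases m1 : some "FAIL" ∈ gs <;> by_cases m2 : some "C" ∈ gs <;>
      by_cases m3 : some "B" ∈ gs <;> by_cases m4 : some "A" ∈ gs <;>
        by_cases m5 : some "AA" ∈ gs <;>
          simp [pvCls, pvCombine, pvPr, m1, m2, m3, m4, m5] <;> decide
  by_cases hC : c = "C"
  · subst hC
    by_cases m1 : some "FAIL" ∈ gs <;> by_cases m2 : some "C" ∈ gs <;>
      by_cases m3 : some "B" ∈ gs <;> by_cases m4 : some "A" ∈ gs <;>
        by_cases m5 : some "AA" ∈ gs <;>
          simp [pvCls, pvCombine, pvPr, m1, m2, m3, m4, m5] <;> decide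
  by_cases hB : c = "B"
  · subst hB
    by_cases m1 : some "FAIL" ∈ gs <;> by_cases m2 : some "C" ∈ gs <;>
      by_cases m3 : some "B" ∈ gs <;> by_cases m4 : some "A" ∈ gs <;>
        by_cases m5 : some "AA" ∈ gs <;>
          simp [pvCls, pvCombine, pvPr, m1, m2, m3, m4, m5] <;> decide
  by_cases hA : c = "A"
  · subst hA
    by_cases m1 : some "FAIL" ∈ gs <;> by_cases m2 : some "C" ∈ gs <;>
      by_cases m3 : some "B" ∈ gs <;> by_cases m4 : some "A" ∈ gs <;>
        by_cases m5 : some "AA" ∈ gs <;>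
          simp [pvCls, pvCombine, pvPr, m1, m2, m3, m4, m5] <;> decide
  by_cases hAA : c = "AA"
  · subst hAA
    by_cases m1 : some "FAIL" ∈ gs <;> by_cases m2 : some "C" ∈ gs <;>
      by_cases m3 : some "B" ∈ gs <;> by_cases m4 : some "A" ∈ gs <;>
        by_cases m5 : some "AA" ∈ gs <;>
          simp [pvCls, pvCombine, pvPr, m1, m2, m3, m4, m5] <;> decide
  -- c is not a priority key: the row is ignored by both sides
  have hcf : pvPriority.contains c = false := by
    rw [pvPriority_mk, PySem.Dict.contains_mk]
    simp only [List.any_cons, List.any_nil, Bool.or_eq_false_iff, beq_eq_false_iff_ne, ne_eq]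
    exact ⟨fun h => hAA h.symm, fun h => hA h.symm, fun h => hB h.symm, fun h => hC h.symm,
      fun h => hF h.symm, trivial⟩
  have hcls : pvCls (some c) = none := by simp [pvCls, hcf]
  rw [hcls, pvCombine_none_left]
  have hmem : ∀ x : String, x ≠ c → ((some x ∈ (some c :: gs)) ↔ some x ∈ gs) := by
    intro x hx; simp [List.mem_cons, hx]
  simp only [hmem "FAIL" (Ne.symm hF), hmem "C" (Ne.symm hC), hmem "B" (Ne.symm hB),
    hmem "A" (Ne.symm hA), hmem "AA" (Ne.symm hAA)]

lemma pvAlt_eq_pvBest (rows : List (List (String × String))) :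
    overall_class_py_alt rows =
      pvBest (rows.map (fun row => PySem.Dict.get? (PySem.Dict.mk row) "class")) := by
  simp only [overall_class_py_alt, pvBest]
  congr 1
  funext c
  simp [PySem.Set.contains_eq_listContains, PySem.Set.mem_ofList]

lemma pvFold_eq (rows : List (List (String × String))) :
    ∀ w : Option String,
      rows.foldl pvStepA w =
        pvCombine w (pvBest (rows.map (fun row => PySem.Dict.get? (PySem.Dict.mk row) "class"))) := by
  induction rows with
  | nil => intro w; simp [pvBest, pvCombine, List.find?]
  | cons row rows ih =>
    intro w
    simp only [List.foldl_cons, List.map_cons, pvBest_cons, ← pvCombine_assoc]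
    rw [ih, pvStepA_eq]

-- ===== VERDICT (by name: the statement is the Claim_ definition above) =====
theorem overall_class_py_spec : Claim_equal_overall_class_py := by
  intro rows _
  unfold Spec_overall_class_py overall_class_py
  rw [pvFold_eq, pvAlt_eq_pvBest, pvCombine_none_left]
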